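-- pv_equiv track=rewrite | github.com/pluplu77/Post_processing | wikidata_invalid_case_pipeline.py | parse_path_from_binding
-- ===== SOURCE A (Python) =====
-- from typing import Any, Dict, List, Optional, Tuple
--
-- def parse_path_from_binding(row: Dict[str, Any], qid1: str, qid2: str, hops: int) -> List[Tuple[str, str, str]]:
--     """
--     Convert one SPARQL result row to path edges:
--       [(source_qid, pid, target_qid), ...]
--     """
--     path_edges: List[Tuple[str, str, str]] = []
--
--     if hops == 1:
--         pid = row["p1"]["value"].rsplit("/", 1)[-1]
--         path_edges.append((qid1, pid, qid2))
--         return path_edges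
--
--     current_source = qid1
--     for i in range(1, hops + 1):
--         pid = row[f"p{i}"]["value"].rsplit("/", 1)[-1]
--         if i < hops:
--             next_qid = row[f"n{i}"]["value"].rsplit("/", 1)[-1]
--         else:
--             next_qid = qid2
--
--         path_edges.append((current_source, pid, next_qid))
--         current_source = next_qid
--
--     return path_edges
-- ===== SOURCE B (Python) =====
-- from typing import Any, Dict, List, Tuple
--
-- def parse_path_from_binding(row: Dict[str, Any], qid1: str, qid2: str, hops: int) -> List[Tuple[str, str, str]]:
--     """Build the node sequence and the predicate sequence separately, then zip them into edges."""
--     nodes = [qid1] + [row[f"n{i}"]["value"].rsplit("/", 1)[-1] for i in range(1, hops)] + [qid2]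
--     pids = [row[f"p{i}"]["value"].rsplit("/", 1)[-1] for i in range(1, hops + 1)]
--     return [(nodes[j], pid, nodes[j + 1]) for j, pid in enumerate(pids)]
-- ===== Notes on version B (the rewrite author's own statement) =====
-- stated objective: simpler
-- what changed: Replaces the accumulator-threaded loop with its hops==1 special case by building the node list and the predicate list separately and zipping adjacent nodes with predicates; the special case disappears.
import Mathlib
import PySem

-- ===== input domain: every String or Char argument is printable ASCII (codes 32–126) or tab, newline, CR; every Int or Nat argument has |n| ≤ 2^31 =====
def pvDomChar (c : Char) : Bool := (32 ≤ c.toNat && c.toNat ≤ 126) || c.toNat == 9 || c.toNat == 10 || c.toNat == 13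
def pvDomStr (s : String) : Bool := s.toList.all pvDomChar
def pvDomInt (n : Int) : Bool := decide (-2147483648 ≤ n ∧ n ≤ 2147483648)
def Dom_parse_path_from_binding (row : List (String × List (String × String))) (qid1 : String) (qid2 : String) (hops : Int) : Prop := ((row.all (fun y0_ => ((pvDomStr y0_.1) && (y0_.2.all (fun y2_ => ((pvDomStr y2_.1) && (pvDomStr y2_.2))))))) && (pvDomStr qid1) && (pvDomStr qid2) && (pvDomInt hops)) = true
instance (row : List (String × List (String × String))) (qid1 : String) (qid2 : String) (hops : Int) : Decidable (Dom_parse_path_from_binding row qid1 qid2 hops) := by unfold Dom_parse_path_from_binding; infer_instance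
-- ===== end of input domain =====

-- B builds the node list and the predicate list separately and zips adjacent nodes with predicates,
-- dropping A's hops==1 special case and accumulator-threaded loop (objective: simpler).


-- shared helper of both ports: Python's  s.rsplit("/", 1)[-1]  — the suffix after the last '/'
-- (exact: rsplit("/",1)[-1] keeps everything after the last '/', or the whole string if no '/')
def pvLastSeg (s : String) : String :=
  String.ofList ((s.toList.reverse.takeWhile (fun c => c ≠ '/')).reverse)

-- shared helper of both ports: Python's  row[key]["value"].rsplit("/", 1)[-1]
-- (dict lookup = first match in the association list; under Pre_ both keys are present, so getD never fires)
def pvSeg (row : List (String × List (String × String))) (key : String) : String :=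
  pvLastSeg ((((row.lookup key).getD []).lookup "value").getD "")

-- ===== PORT A =====
def parse_path_from_binding (row : List (String × List (String × String))) (qid1 : String) (qid2 : String) (hops : Int) : List (String × String × String) :=
  if hops = 1 then
    [(qid1, pvSeg row "p1", qid2)]
  else
    ((PySem.List.pyRange 1 (hops + 1) 1).foldl
      (fun (st : String × List (String × String × String)) i =>
        let pid := pvSeg row ("p" ++ PySem.Int.toStr i)
        let next_qid := if i < hops then pvSeg row ("n" ++ PySem.Int.toStr i) else qid2
        (next_qid, st.2 ++ [(st.1, pid, next_qid)]))
      (qid1, [])).2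

-- ===== PORT B =====
def parse_path_from_binding_alt (row : List (String × List (String × String))) (qid1 : String) (qid2 : String) (hops : Int) : List (String × String × String) :=
  let nodes := [qid1] ++ (PySem.List.pyRange 1 hops 1).map (fun i => pvSeg row ("n" ++ PySem.Int.toStr i)) ++ [qid2]
  let pids := (PySem.List.pyRange 1 (hops + 1) 1).map (fun i => pvSeg row ("p" ++ PySem.Int.toStr i))
  (PySem.List.enumerate pids 0).map
    (fun jp => (PySem.List.pyGetD nodes jp.1 "", jp.2, PySem.List.pyGetD nodes (jp.1 + 1) ""))

-- ===== PRECONDITION & SPEC =====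
-- Pre_ excludes exactly the inputs on which Python A raises KeyError: some needed key
-- "p<i>" / "n<i>" is missing from row, or its inner dict lacks "value".
-- (the first conjunct is implied by the key requirements — hops distinct keys "p1".."p<hops>" must all
-- occur in row — so it does not narrow the condition; it only lets the decision procedure fail fast)
def Pre_parse_path_from_binding (row : List (String × List (String × String))) (qid1 : String) (qid2 : String) (hops : Int) : Prop :=
  hops ≤ PySem.List.len row ∧
  ∀ i ∈ PySem.List.pyRange 1 (hops + 1) 1,
    ((row.lookup ("p" ++ PySem.Int.toStr i)).bind (fun d => d.lookup "value")).isSome = true ∧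
    (i < hops → ((row.lookup ("n" ++ PySem.Int.toStr i)).bind (fun d => d.lookup "value")).isSome = true)
instance (row : List (String × List (String × String))) (qid1 : String) (qid2 : String) (hops : Int) : Decidable (Pre_parse_path_from_binding row qid1 qid2 hops) := by unfold Pre_parse_path_from_binding; infer_instance

def pvWitness_parse_path_from_binding : (List (String × List (String × String))) × String × String × Int :=
  ([("p1", [("value", "http://w/P5")]), ("n1", [("value", "Q9")]), ("p2", [("value", "P6")])], "Q1", "Q2", 2)

def Spec_parse_path_from_binding (row : List (String × List (String × String))) (qid1 : String) (qid2 : String) (hops : Int) (out : List (String × String × String)) : Prop := out = parse_path_from_binding_alt row qid1 qid2 hops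
instance (row : List (String × List (String × String))) (qid1 : String) (qid2 : String) (hops : Int) (out : List (String × String × String)) : Decidable (Spec_parse_path_from_binding row qid1 qid2 hops out) := by unfold Spec_parse_path_from_binding; infer_instance

-- ===== CLAIM (what is proved, stated in full; the proofs are below) =====
def Claim_equal_parse_path_from_binding : Prop := ∀ (row : List (String × List (String × String))) (qid1 : String) (qid2 : String) (hops : Int), Dom_parse_path_from_binding row qid1 qid2 hops → Pre_parse_path_from_binding row qid1 qid2 hops → Spec_parse_path_from_binding row qid1 qid2 hops (parse_path_from_binding row qid1 qid2 hops)

-- ===== LEMMAS AND PROOFS =====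

-- the common value both programs compute: the j-th node of the path
def pvNode (row : List (String × List (String × String))) (qid1 qid2 : String) (m : Nat) (j : Nat) : String :=
  if j = 0 then qid1 else if j < m then pvSeg row ("n" ++ PySem.Int.toStr (j : Int)) else qid2

-- the closed form both sides are reduced to
def pvEdges (row : List (String × List (String × String))) (qid1 qid2 : String) (m : Nat) : List (String × String × String) :=
  (List.range m).map (fun k =>
    (pvNode row qid1 qid2 m k, pvSeg row ("p" ++ PySem.Int.toStr ((1 : Int) + (k : Int))), pvNode row qid1 qid2 m (k + 1)))

lemma foldA_inv (row : List (String × List (String × String))) (qid1 qid2 : String) (hops : Int) (m : Nat)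
    (hm : hops = (m : Int)) (t : Nat) (ht : t ≤ m) :
    (((List.range t).map (fun k : Nat => (1 : Int) + (k : Int))).foldl
      (fun (st : String × List (String × String × String)) i =>
        (if i < hops then pvSeg row ("n" ++ PySem.Int.toStr i) else qid2,
         st.2 ++ [(st.1, pvSeg row ("p" ++ PySem.Int.toStr i),
                   if i < hops then pvSeg row ("n" ++ PySem.Int.toStr i) else qid2)]))
      (qid1, []))
    = (pvNode row qid1 qid2 m t,
       (List.range t).map (fun k =>
         (pvNode row qid1 qid2 m k, pvSeg row ("p" ++ PySem.Int.toStr ((1 : Int) + (k : Int))), pvNode row qid1 qid2 m (k + 1)))) := by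
  induction t with
  | zero => simp [pvNode]
  | succ t ih =>
    rw [List.range_succ, List.map_append, List.foldl_append, ih (by omega), List.map_append]
    simp only [List.map_cons, List.map_nil, List.foldl_cons, List.foldl_nil]
    by_cases h : t + 1 < m
    · have hlt : ((1 : Int) + (t : Int) < hops) := by omega
      have hlt2 : ((t : Int) + 1 < hops) := by omega
      simp [hlt2, pvNode, h, show (1 : Int) + (t : Int) = ((t + 1 : Nat) : Int) by push_cast; ring]
    · have hlt : ¬ ((1 : Int) + (t : Int) < hops) := by omega
      have hlt2 : ¬ ((t : Int) + 1 < hops) := by omega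
      simp [hlt, pvNode, h]

lemma A_eq_edges (row : List (String × List (String × String))) (qid1 qid2 : String) (hops : Int) (m : Nat)
    (hm : hops = (m : Int)) :
    parse_path_from_binding row qid1 qid2 hops = pvEdges row qid1 qid2 m := by
  unfold parse_path_from_binding pvEdges
  by_cases h1 : hops = 1
  · have hm1 : m = 1 := by omega
    subst hm1
    simp [h1, List.range_succ, pvNode,
      show ("p" ++ PySem.Int.toStr (1 : Int)) = "p1" from by decide]
  · simp only [h1, if_false]
    rw [PySem.List.pyRange_one]
    have he : (hops + 1 - 1).toNat = m := by omega
    rw [he]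
    have := foldA_inv row qid1 qid2 hops m hm m (le_refl m)
    simp only at this ⊢
    rw [this]

lemma nodes_getD (row : List (String × List (String × String))) (qid1 qid2 : String) (hops : Int) (m : Nat)
    (hm : hops = (m : Int)) (j : Nat) (hj : j ≤ m) :
    PySem.List.pyGetD ([qid1] ++ (PySem.List.pyRange 1 hops 1).map (fun i => pvSeg row ("n" ++ PySem.Int.toStr i)) ++ [qid2]) (j : Int) ""
    = pvNode row qid1 qid2 m j := by
  rw [PySem.List.pyGetD_natCast, List.getD_eq_getElem?_getD]
  have hlenmid : ((PySem.List.pyRange 1 hops 1).map (fun i => pvSeg row ("n" ++ PySem.Int.toStr i))).length = m - 1 := by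
    rw [List.length_map, PySem.List.length_pyRange_one]; omega
  rcases Nat.eq_zero_or_pos j with h0 | hpos
  · subst h0; simp [pvNode]
  · have hm1 : 1 ≤ m := by omega
    obtain ⟨j', rfl⟩ : ∃ j', j = j' + 1 := ⟨j - 1, by omega⟩
    simp only [List.cons_append, List.nil_append, List.getElem?_cons_succ]
    by_cases hmid : j' < m - 1
    · rw [List.getElem?_append_left (by omega)]
      rw [List.getElem?_map, PySem.List.getElem?_pyRange_one]
      have hj' : j' < (hops - 1).toNat := by omega
      rw [if_pos hj']
      simp only [Option.map_some, Option.getD_some]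
      have hc : (1 : Int) + (j' : Int) = (((j' + 1 : Nat)) : Int) := by push_cast; ring
      rw [hc]
      simp [pvNode, show j' + 1 < m by omega]
    · have hjm : j' + 1 = m := by omega
      rw [List.getElem?_append_right (by omega)]
      rw [hlenmid]
      have h0' : j' - (m - 1) = 0 := by omega
      rw [h0']
      simp [pvNode, show ¬ (j' + 1 < m) by omega]

lemma B_eq_edges (row : List (String × List (String × String))) (qid1 qid2 : String) (hops : Int) (m : Nat)
    (hm : hops = (m : Int)) :
    parse_path_from_binding_alt row qid1 qid2 hops = pvEdges row qid1 qid2 m := by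
  unfold parse_path_from_binding_alt pvEdges
  dsimp only
  rw [PySem.List.enumerate_eq_map_pyRange _ ""]
  rw [List.map_map]
  have hlen : PySem.List.len ((PySem.List.pyRange 1 (hops + 1) 1).map (fun i => pvSeg row ("p" ++ PySem.Int.toStr i))) = (m : Int) := by
    rw [PySem.List.len_eq, List.length_map, PySem.List.length_pyRange_one]
    omega
  rw [hlen, PySem.List.pyRange_zero_natCast, List.map_map]
  apply List.map_congr_left
  intro k hk
  rw [List.mem_range] at hk
  simp only [Function.comp_apply]
  have hp : PySem.List.pyGetD ((PySem.List.pyRange 1 (hops + 1) 1).map (fun i => pvSeg row ("p" ++ PySem.Int.toStr i))) ((k : Int)) ""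
      = pvSeg row ("p" ++ PySem.Int.toStr ((1 : Int) + (k : Int))) := by
    exact PySem.List.pyGetD_map_pyRange_one _ 1 (hops + 1) k "" (by omega)
  have hn1 := nodes_getD row qid1 qid2 hops m hm k (by omega)
  have hn2 := nodes_getD row qid1 qid2 hops m hm (k + 1) (by omega)
  have hc : ((k : Int) + 1) = (((k + 1 : Nat)) : Int) := by push_cast; ring
  rw [hp, hc, hn1, hn2]

-- ===== VERDICT (by name: the statement is the Claim_ definition above) =====
theorem parse_path_from_binding_spec : Claim_equal_parse_path_from_binding := by
  intro row qid1 qid2 hops _ _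
  unfold Spec_parse_path_from_binding
  by_cases hpos : 0 ≤ hops
  · have hm : hops = (hops.toNat : Int) := by omega
    rw [A_eq_edges row qid1 qid2 hops hops.toNat hm, B_eq_edges row qid1 qid2 hops hops.toNat hm]
  · have h1 : hops ≠ 1 := by omega
    unfold parse_path_from_binding parse_path_from_binding_alt
    rw [PySem.List.pyRange_one_eq_nil (by omega : hops + 1 ≤ 1)]
    simp [h1]
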